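-- pv_equiv track=rewrite | github.com/Lambosaurus/Advent-of-code | 2025/2/main.py | n_part_id
-- ===== SOURCE A (Python) =====
-- def n_part_id(s, n):
--     digits = len(s)
--     if digits % n != 0:
--         return False
--
--     size = digits // n
--     segment = s[:size]
--     for i in range(1, n):
--         if s[i*size:(i+1)*size] != segment:
--             return False
--     return True
-- ===== SOURCE B (Python) =====
-- def n_part_id(s, n):
--     if len(s) % n != 0:
--         return False
--     size = len(s) // n
--     return s[:size] * n == s
-- ===== Notes on version B (the rewrite author's own statement) =====
-- stated objective: simpler
-- what changed: Replaces the per-segment loop comparing each slice with one closed-form test: build the first segment repeated n times and compare it to the whole string.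
-- intended difference: For negative n that divides len(s) with s non-empty, A's range(1,n) loop is empty so A returns True, while B returns False because no repetition of a segment reconstructs s; B's answer is the intended one since a string cannot be a negative number of repeated parts. — e.g. on n_part_id("abab", -2): A returns true, B returns false
import Mathlib
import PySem

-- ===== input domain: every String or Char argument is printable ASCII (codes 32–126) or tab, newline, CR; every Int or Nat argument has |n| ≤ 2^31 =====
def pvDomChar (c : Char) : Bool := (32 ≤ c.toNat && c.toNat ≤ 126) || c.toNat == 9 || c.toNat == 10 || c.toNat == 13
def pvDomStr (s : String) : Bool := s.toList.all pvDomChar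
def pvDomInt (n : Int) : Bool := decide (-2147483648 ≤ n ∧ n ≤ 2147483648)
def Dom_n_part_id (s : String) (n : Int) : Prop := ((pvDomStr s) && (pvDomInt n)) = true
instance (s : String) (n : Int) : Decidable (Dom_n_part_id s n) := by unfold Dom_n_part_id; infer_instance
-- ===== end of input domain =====

-- B replaces A's per-segment comparison loop by one closed-form test (first segment repeated
-- n times equals s); for negative n dividing len(s) (s nonempty) B returns the intended False
-- where A's empty loop returns True (stated as D_ below).


-- ===== PORT A =====
def n_part_id (s : String) (n : Int) : Bool :=
  let cs := s.toList
  let digits : Int := cs.length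
  if PySem.Int.mod digits n ≠ 0 then false
  else
    let size := PySem.Int.floordiv digits n
    let segment := PySem.List.slice cs none (some size)
    -- 'for i in range(1, n): if s[i*size:(i+1)*size] != segment: return False' / 'return True'
    -- — the early-exit loop is exactly .all over the same range
    (PySem.List.pyRange 1 n 1).all (fun i =>
      PySem.List.slice cs (some (i * size)) (some ((i + 1) * size)) == segment)

-- ===== PORT B =====
def n_part_id_alt (s : String) (n : Int) : Bool :=
  let cs := s.toList
  if PySem.Int.mod (cs.length : Int) n ≠ 0 then false
  else
    let size := PySem.Int.floordiv (cs.length : Int) n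
    PySem.List.pyRepeat (PySem.List.slice cs none (some size)) n == cs

-- ===== PRECONDITION & SPEC =====
-- Pre_ excludes only n = 0, where A (and B) raise ZeroDivisionError.
def Pre_n_part_id (s : String) (n : Int) : Prop := n ≠ 0
instance (s : String) (n : Int) : Decidable (Pre_n_part_id s n) := by unfold Pre_n_part_id; infer_instance
def pvWitness_n_part_id : String × Int := ("abab", 2)

-- For negative n dividing len(s) with s non-empty, A's range(1,n) loop is empty so A returns
-- True, while B returns False since no repetition of a segment rebuilds s; B's value is the
-- intended one (a non-empty string is not a negative number of repeated parts).
def D_n_part_id (s : String) (n : Int) : Prop :=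
  n < 0 ∧ s.toList ≠ [] ∧ PySem.Int.mod (s.toList.length : Int) n = 0
instance (s : String) (n : Int) : Decidable (D_n_part_id s n) := by unfold D_n_part_id; infer_instance

def Spec_n_part_id (s : String) (n : Int) (out : Bool) : Prop := ¬ D_n_part_id s n → out = n_part_id_alt s n
instance (s : String) (n : Int) (out : Bool) : Decidable (Spec_n_part_id s n out) := by unfold Spec_n_part_id; infer_instance

def pvDiffWitness_n_part_id : String × Int := ("abab", -2)
def pvDiffWitnessOut_n_part_id : Bool × Bool := (true, false)

-- ===== CLAIM (what is proved, stated in full; the proofs are below) =====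
def Claim_unchanged_n_part_id : Prop := ∀ (s : String) (n : Int), Dom_n_part_id s n → Pre_n_part_id s n → Spec_n_part_id s n (n_part_id s n)
def Claim_changed_n_part_id : Prop := Dom_n_part_id (pvDiffWitness_n_part_id.1) (pvDiffWitness_n_part_id.2) ∧ Pre_n_part_id (pvDiffWitness_n_part_id.1) (pvDiffWitness_n_part_id.2) ∧ D_n_part_id (pvDiffWitness_n_part_id.1) (pvDiffWitness_n_part_id.2) ∧ n_part_id (pvDiffWitness_n_part_id.1) (pvDiffWitness_n_part_id.2) = pvDiffWitnessOut_n_part_id.1 ∧ n_part_id_alt (pvDiffWitness_n_part_id.1) (pvDiffWitness_n_part_id.2) = pvDiffWitnessOut_n_part_id.2 ∧ pvDiffWitnessOut_n_part_id.1 ≠ pvDiffWitnessOut_n_part_id.2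
def Claim_exact_n_part_id : Prop := ∀ (s : String) (n : Int), Dom_n_part_id s n → Pre_n_part_id s n → D_n_part_id s n → n_part_id s n ≠ n_part_id_alt s n

-- ===== LEMMAS AND PROOFS =====

-- flatten (replicate N seg) = cs  ↔  every size-sz block of cs equals seg
lemma repeat_iff_blocks {α : Type} (N sz : Nat) (seg cs : List α)
    (hseg : seg.length = sz) (hlen : cs.length = N * sz) :
    (List.replicate N seg).flatten = cs ↔ ∀ k, k < N → (cs.drop (k * sz)).take sz = seg := by
  induction N generalizing cs with
  | zero =>
    simp only [Nat.zero_mul] at hlen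
    have : cs = [] := List.eq_nil_of_length_eq_zero hlen
    subst this
    simp
  | succ N ih =>
    have hsz_le : sz ≤ cs.length := by
      rw [hlen, Nat.succ_mul]; omega
    have hdroplen : (cs.drop sz).length = N * sz := by
      rw [List.length_drop, hlen, Nat.succ_mul]; omega
    constructor
    · intro h
      have hc : seg ++ (List.replicate N seg).flatten = cs := by
        simpa [List.replicate_succ] using h
      have htake : cs.take sz = seg := by
        rw [← hc, List.take_append_of_le_length (by omega), List.take_of_length_le (by omega)]
      have hdrop : (List.replicate N seg).flatten = cs.drop sz := by
        rw [← hc, List.drop_append_of_le_length (by omega)]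
        simp [hseg]
      intro k hk
      cases k with
      | zero => simpa using htake
      | succ k =>
        have := (ih (cs.drop sz) hdroplen).mp hdrop k (by omega)
        rw [List.drop_drop] at this
        rw [show (k+1) * sz = sz + k * sz by ring]
        exact this
    · intro h
      have htake : cs.take sz = seg := by simpa using h 0 (by omega)
      have hrest : ∀ k, k < N → ((cs.drop sz).drop (k * sz)).take sz = seg := by
        intro k hk
        rw [List.drop_drop, show sz + k * sz = (k+1) * sz by ring]
        exact h (k+1) (by omega)
      have hdrop : (List.replicate N seg).flatten = cs.drop sz :=
        (ih (cs.drop sz) hdroplen).mpr hrest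
      rw [List.replicate_succ, List.flatten_cons, hdrop, ← htake]
      exact List.take_append_drop sz cs

lemma n_part_id_eq_alt (s : String) (n : Int) (hpre : n ≠ 0)
    (hnd : ¬ (n < 0 ∧ s.toList ≠ [] ∧ PySem.Int.mod (s.toList.length : Int) n = 0)) :
    n_part_id s n = n_part_id_alt s n := by
  unfold n_part_id n_part_id_alt
  dsimp only
  split_ifs with hcond
  · rfl
  · push_neg at hcond
    rcases lt_trichotomy n 0 with hn | hn | hn
    · -- n < 0 : outside D_ forces s = ""
      have hcs : s.toList = [] := by
        by_contra hne; exact hnd ⟨hn, hne, hcond⟩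
      rw [hcs]
      simp [PySem.List.pyRange_one_eq_nil (by omega : n ≤ 1), PySem.List.pyRepeat,
        PySem.List.slice]
    · exact absurd hn hpre
    · -- n > 0 : the real case
      set cs := s.toList with hcsdef
      obtain ⟨N, hN⟩ : ∃ N : Nat, n = (N : Int) := ⟨n.toNat, (Int.toNat_of_nonneg (le_of_lt hn)).symm⟩
      have hNpos : 0 < N := by omega
      have hdvd : (N : Int) ∣ (cs.length : Int) := by
        rw [← hN]; exact (PySem.Int.mod_eq_zero_iff_dvd _ _).mp hcond
      have hdvdN : N ∣ cs.length := by exact_mod_cast hdvd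
      set sz := cs.length / N with hszdef
      have hlen : cs.length = N * sz := (Nat.mul_div_cancel' hdvdN).symm
      have hsz_le : sz ≤ cs.length := hlen ▸ Nat.le_mul_of_pos_left sz hNpos
      have hsize : PySem.Int.floordiv (cs.length : Int) n = (sz : Int) := by
        rw [hN]; exact_mod_cast PySem.Int.floordiv_natCast cs.length N
      rw [hsize]
      have hseg : PySem.List.slice cs none (some (sz : Int)) = cs.take sz := by
        simpa using PySem.List.slice_to_natCast cs sz
      rw [hseg]
      have hseglen : (cs.take sz).length = sz := by
        rw [List.length_take, Nat.min_eq_left hsz_le]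
      have hkey := repeat_iff_blocks N sz (cs.take sz) cs hseglen hlen
      rw [Bool.eq_iff_iff]
      simp only [List.all_eq_true, beq_iff_eq]
      rw [PySem.List.pyRepeat, hN]
      constructor
      · intro h
        rw [Int.toNat_natCast, hkey]
        intro k hk
        cases k with
        | zero => simp
        | succ k =>
          have hmem : ((k+1 : Nat) : Int) ∈ PySem.List.pyRange 1 (N : Int) 1 := by
            rw [PySem.List.mem_pyRange_one]; constructor <;> [omega; exact_mod_cast hk]
          have := h _ hmem
          rw [show ((k+1 : Nat) : Int) * (sz : Int) = (((k+1)*sz : Nat) : Int) by push_cast; ring,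
            show ((k+1 : Nat) : Int) + 1 = (((k+1)+1 : Nat) : Int) by push_cast; ring] at this
          rw [show (((k+1)+1 : Nat) : Int) * (sz:Int) = (((k+1)*sz : Nat) : Int) + ((sz : Nat) : Int) by push_cast; ring] at this
          rwa [PySem.List.slice_natCast_add] at this
      · intro h i hmem
        rw [Int.toNat_natCast, hkey] at h
        rw [PySem.List.mem_pyRange_one] at hmem
        obtain ⟨k, hk⟩ : ∃ k : Nat, i = (k : Int) := ⟨i.toNat, (Int.toNat_of_nonneg (by omega)).symm⟩
        subst hk
        have hkN : k < N := by exact_mod_cast hmem.2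
        have := h k hkN
        rw [show ((k : Nat) : Int) * (sz : Int) = ((k*sz : Nat) : Int) by push_cast; ring,
          show ((k:Nat) : Int) + 1 = ((k+1 : Nat) : Int) by push_cast; ring,
          show ((k+1 : Nat) : Int) * (sz:Int) = ((k*sz : Nat) : Int) + ((sz : Nat) : Int) by push_cast; ring,
          PySem.List.slice_natCast_add]
        exact this

-- ===== VERDICT =====
theorem n_part_id_spec : Claim_unchanged_n_part_id := by
  intro s n _ hpre hnd
  exact n_part_id_eq_alt s n hpre hnd

theorem n_part_id_changed : Claim_changed_n_part_id := by
  unfold Claim_changed_n_part_id; decide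

theorem n_part_id_tight : Claim_exact_n_part_id := by
  intro s n _ hpre hd
  obtain ⟨hn, hne, hm⟩ := hd
  unfold n_part_id n_part_id_alt
  dsimp only
  rw [if_neg (not_not_intro hm), if_neg (not_not_intro hm)]
  have htoNat : n.toNat = 0 := Int.toNat_of_nonpos hn.le
  rw [PySem.List.pyRange_one_eq_nil (by omega : n ≤ 1)]
  have hrep : PySem.List.pyRepeat (PySem.List.slice s.toList none (some (PySem.Int.floordiv (s.toList.length : Int) n))) n = [] := by
    unfold PySem.List.pyRepeat
    rw [htoNat, List.replicate_zero, List.flatten_nil]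
  rw [hrep]
  obtain ⟨c, cs, hcs⟩ : ∃ c cs, s.toList = c :: cs := by
    cases h : s.toList with
    | nil => exact absurd h hne
    | cons c cs => exact ⟨c, cs, rfl⟩
  rw [hcs]
  simp
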